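-- pv_equiv track=rewrite | github.com/k-syou/TIL | CodingTest/swea/250213/swea_2117_home_secure_service.py | get_searching_loc
-- ===== SOURCE A (Python) =====
-- def get_distance(y, x):
--     # 0, 0 으로부터 거리 계산
--     return abs(y) + abs(x)
--
-- def get_searching_loc(K):
--     # 거리가 k 만큼 차이나는 좌표들을 searching_loc[k] 배열에 저장
--     # searching_loc = [[(0, 0)], [(-1, 0), (0, -1), (0, 1), (1, 0)] ...]
--     searching_loc = [[None] * ((i - 1) * 4 if i > 1 else 1) for i in range(1, K + 1)]
--     index_list = [0] * (K + 1)
--     for y in range(-K, K + 1):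
--         for x in range(-K, K + 1):
--             dist = get_distance(y, x)
--             if dist >= K:
--                 continue
--             searching_loc[dist][index_list[dist]] = (y, x)
--             index_list[dist] += 1
--
--     return searching_loc
-- ===== SOURCE B (Python) =====
-- def get_searching_loc(K):
--     # Build each distance ring directly from geometry instead of scanning the whole square.
--     searching_loc = []
--     for d in range(K):
--         ring = []
--         for y in range(-d, d + 1):
--             r = d - abs(y)
--             if r > 0:
--                 ring.append((y, -r))
--                 ring.append((y, r))
--             else:
--                 ring.append((y, 0))
--         searching_loc.append(ring)
--     return searching_loc
-- ===== Notes on version B (the rewrite author's own statement) =====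
-- stated objective: alternative
-- what changed: B constructs each distance ring directly from geometry (for each d, walk y from -d to d and emit x = ±(d-|y|)) instead of preallocating buckets and scanning all (2K+1)^2 grid cells bucketing by computed distance.
import Mathlib
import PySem

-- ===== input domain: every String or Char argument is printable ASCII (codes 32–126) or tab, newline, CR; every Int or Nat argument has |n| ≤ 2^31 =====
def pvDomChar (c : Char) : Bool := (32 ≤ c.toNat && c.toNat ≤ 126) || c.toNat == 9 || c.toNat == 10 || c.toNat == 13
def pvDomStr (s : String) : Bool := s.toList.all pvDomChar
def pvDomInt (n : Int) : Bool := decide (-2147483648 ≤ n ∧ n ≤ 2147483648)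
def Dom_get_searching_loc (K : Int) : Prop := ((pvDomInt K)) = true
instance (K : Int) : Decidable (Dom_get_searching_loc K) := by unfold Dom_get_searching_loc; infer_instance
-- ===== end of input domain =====

-- B builds each Manhattan-distance ring directly from geometry (for each d, y runs -d..d and x = ±(d-|y|))
-- instead of A's preallocate-buckets-and-scan of the whole (2K+1)^2 square (objective: alternative decomposition).


-- ===== PORT A =====
def get_distance (y x : Int) : Int := |y| + |x|

-- one grid-cell step of A's nested loop over the state (searching_loc, index_list); dist = |y|+|x| ≥ 0
-- so `.toNat` is exact, and whenever dist < K every indexed read/write is in range (Python never raises here)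
def gslStep (K : Int) (st : List (List (Option (Int × Int))) × List Int) (y x : Int) :
    List (List (Option (Int × Int))) × List Int :=
  let dist := get_distance y x
  if dist ≥ K then st
  else
    let idx := st.2.getD dist.toNat 0
    (st.1.set dist.toNat ((st.1.getD dist.toNat []).set idx.toNat (some (y, x))),
     st.2.set dist.toNat (idx + 1))

def get_searching_loc (K : Int) : List (List (Int × Int)) :=
  let searching_loc : List (List (Option (Int × Int))) :=
    (PySem.List.pyRange 1 (K + 1) 1).map (fun i =>
      List.replicate (if i > 1 then ((i - 1) * 4).toNat else 1) none)
  let index_list : List Int := List.replicate (K + 1).toNat 0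
  let st := (PySem.List.pyRange (-K) (K + 1) 1).foldl (fun st y =>
      (PySem.List.pyRange (-K) (K + 1) 1).foldl (fun st x => gslStep K st y x) st)
    (searching_loc, index_list)
  -- A returns the (by then fully filled) preallocated rows of tuples; the Option wrapper only
  -- modelled Python's None placeholders, so it is dropped to meet the declared return type
  st.1.map (fun row => row.map (fun o => o.getD (0, 0)))

-- ===== PORT B =====
def get_searching_loc_alt (K : Int) : List (List (Int × Int)) :=
  (PySem.List.pyRange 0 K 1).foldl (fun acc d =>
    acc ++ [(PySem.List.pyRange (-d) (d + 1) 1).foldl (fun ring y =>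
      let r := d - |y|
      if r > 0 then ring ++ [(y, -r)] ++ [(y, r)] else ring ++ [(y, 0)]) []]) []

-- ===== PRECONDITION & SPEC =====
def Spec_get_searching_loc (K : Int) (out : List (List (Int × Int))) : Prop := out = get_searching_loc_alt K
instance (K : Int) (out : List (List (Int × Int))) : Decidable (Spec_get_searching_loc K out) := by unfold Spec_get_searching_loc; infer_instance

-- ===== CLAIM (what is proved, stated in full; the proofs are below) =====
def Claim_equal_get_searching_loc : Prop := ∀ (K : Int), Dom_get_searching_loc K → Spec_get_searching_loc K (get_searching_loc K)

-- ===== LEMMAS AND PROOFS =====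


lemma filter_pyRange_nil (a b : Int) (p : Int → Bool) (h : ∀ x, a ≤ x → x < b → p x = false) :
    (PySem.List.pyRange a b 1).filter p = [] := by
  refine List.filter_eq_nil_iff.mpr ?_
  intro x hx
  rw [PySem.List.mem_pyRange_one] at hx
  simp [h x hx.1 hx.2]

lemma rowFilter_eq (K d y : Int) (_h0 : 0 ≤ d) (hd : d < K) (hy1 : -d ≤ y) (hy2 : y ≤ d) :
    (PySem.List.pyRange (-K) (K+1) 1).filter
      (fun x => decide (get_distance y x = d) && decide (get_distance y x < K))
      = (if d - |y| > 0 then [-(d - |y|), d - |y|] else [0]) := by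
  set r := d - |y| with hr
  have habs : |y| = (y.natAbs : Int) := Int.abs_eq_natAbs y
  split_ifs with hpos
  · rw [PySem.List.pyRange_one_append (-K) (-r) (K+1) (by omega) (by omega),
        PySem.List.pyRange_one_append (-r) (-r+1) (K+1) (by omega) (by omega),
        PySem.List.pyRange_one_append (-r+1) r (K+1) (by omega) (by omega),
        PySem.List.pyRange_one_append r (r+1) (K+1) (by omega) (by omega),
        PySem.List.pyRange_one_singleton, PySem.List.pyRange_one_singleton]
    simp only [List.filter_append]
    rw [filter_pyRange_nil _ _ _ (fun x hx1 hx2 => by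
      simp only [get_distance, habs, Int.abs_eq_natAbs x]
      simp only [Bool.and_eq_false_iff, decide_eq_false_iff_not]
      left; omega)]
    rw [filter_pyRange_nil (-r+1) r _ (fun x hx1 hx2 => by
      simp only [get_distance, habs, Int.abs_eq_natAbs x]
      simp only [Bool.and_eq_false_iff, decide_eq_false_iff_not]
      left; omega)]
    rw [filter_pyRange_nil (r+1) (K+1) _ (fun x hx1 hx2 => by
      simp only [get_distance, habs, Int.abs_eq_natAbs x]
      simp only [Bool.and_eq_false_iff, decide_eq_false_iff_not]
      left; omega)]
    have p1 : (fun x => decide (get_distance y x = d) && decide (get_distance y x < K)) (-r) = true := by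
      simp only [get_distance, habs, Int.abs_eq_natAbs (-r)]
      simp only [Bool.and_eq_true, decide_eq_true_eq]
      omega
    have p2 : (fun x => decide (get_distance y x = d) && decide (get_distance y x < K)) r = true := by
      simp only [get_distance, habs, Int.abs_eq_natAbs r]
      simp only [Bool.and_eq_true, decide_eq_true_eq]
      omega
    simp [p1, p2]
  · rw [PySem.List.pyRange_one_append (-K) 0 (K+1) (by omega) (by omega),
        PySem.List.pyRange_one_append 0 1 (K+1) (by omega) (by omega),
        (by decide : PySem.List.pyRange (0:Int) 1 = [0])]
    simp only [List.filter_append]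
    rw [filter_pyRange_nil _ _ _ (fun x hx1 hx2 => by
      simp only [get_distance, habs, Int.abs_eq_natAbs x]
      simp only [Bool.and_eq_false_iff, decide_eq_false_iff_not]
      left; omega)]
    rw [filter_pyRange_nil 1 (K+1) _ (fun x hx1 hx2 => by
      simp only [get_distance, habs, Int.abs_eq_natAbs x]
      simp only [Bool.and_eq_false_iff, decide_eq_false_iff_not]
      left; omega)]
    have p0 : (fun x => decide (get_distance y x = d) && decide (get_distance y x < K)) 0 = true := by
      simp only [get_distance, habs, abs_zero]
      simp only [Bool.and_eq_true, decide_eq_true_eq]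
      omega
    simp [p0]

def ringPt (d y : Int) : List (Int × Int) :=
  if d - |y| > 0 then [(y, -(d - |y|)), (y, d - |y|)] else [(y, 0)]

def ringB (d : Int) : List (Int × Int) := (PySem.List.pyRange (-d) (d + 1) 1).flatMap (ringPt d)

def bucketSize (d : Int) : Nat := if 1 ≤ d then (4 * d).toNat else 1

def ptsF (K d : Int) (cells : List (Int × Int)) : List (Int × Int) :=
  cells.filter (fun c => decide (get_distance c.1 c.2 = d) && decide (get_distance c.1 c.2 < K))

def grid (K : Int) : List (Int × Int) :=
  (PySem.List.pyRange (-K) (K + 1) 1).flatMap (fun y =>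
    (PySem.List.pyRange (-K) (K + 1) 1).map (fun x => (y, x)))

lemma ringB_spec (K d : Int) (h0 : 0 ≤ d) (hd : d < K) : ptsF K d (grid K) = ringB d := by
  unfold ptsF grid ringB
  rw [List.filter_flatMap]
  set F : Int → List (Int × Int) := fun y =>
    ((PySem.List.pyRange (-K) (K+1) 1).map (fun x => (y, x))).filter
      (fun c => decide (get_distance c.1 c.2 = d) && decide (get_distance c.1 c.2 < K)) with hF
  have hFnil : ∀ y : Int, d < |y| → F y = [] := by
    intro y hy
    rw [hF]
    simp only
    rw [List.filter_map]
    rw [filter_pyRange_nil _ _ _ (fun x hx1 hx2 => by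
      simp only [Function.comp, get_distance, Int.abs_eq_natAbs x, Int.abs_eq_natAbs y] at *
      simp only [Bool.and_eq_false_iff, decide_eq_false_iff_not]
      left; omega)]
    simp
  have hFmid : ∀ y : Int, -d ≤ y → y < d + 1 → F y = ringPt d y := by
    intro y h1 h2
    rw [hF]
    simp only
    rw [List.filter_map]
    have hcomp : (fun c : Int × Int => decide (get_distance c.1 c.2 = d) && decide (get_distance c.1 c.2 < K)) ∘ (fun x => (y, x))
        = fun x => decide (get_distance y x = d) && decide (get_distance y x < K) := rfl
    rw [hcomp, rowFilter_eq K d y h0 hd (by omega) (by omega)]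
    unfold ringPt
    split_ifs <;> simp
  rw [PySem.List.pyRange_one_append (-K) (-d) (K+1) (by omega) (by omega),
      PySem.List.pyRange_one_append (-d) (d+1) (K+1) (by omega) (by omega)]
  simp only [List.flatMap_append]
  have hn1 : (PySem.List.pyRange (-K) (-d) 1).flatMap F = [] := by
    rw [List.flatMap_congr (g := fun _ => []) (fun y hy => by
      rw [PySem.List.mem_pyRange_one] at hy
      exact hFnil y (by simp only [Int.abs_eq_natAbs y] at *; omega))]
    simp
  have hn2 : (PySem.List.pyRange (d+1) (K+1) 1).flatMap F = [] := by
    rw [List.flatMap_congr (g := fun _ => []) (fun y hy => by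
      rw [PySem.List.mem_pyRange_one] at hy
      exact hFnil y (by simp only [Int.abs_eq_natAbs y] at *; omega))]
    simp
  rw [hn1, hn2, List.append_nil, List.nil_append]
  exact List.flatMap_congr (fun y hy => by
    rw [PySem.List.mem_pyRange_one] at hy
    exact hFmid y hy.1 hy.2)

lemma ringB_length (d : Int) (h0 : 0 ≤ d) : (ringB d).length = bucketSize d := by
  unfold ringB bucketSize
  rcases eq_or_lt_of_le h0 with h | h
  · subst h; decide
  · rw [PySem.List.pyRange_one_append (-d) (-d+1) (d+1) (by omega) (by omega),
        PySem.List.pyRange_one_append (-d+1) d (d+1) (by omega) (by omega),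
        PySem.List.pyRange_one_singleton, PySem.List.pyRange_one_singleton]
    simp only [List.flatMap_append, List.length_append]
    have hmid : ((PySem.List.pyRange (-d+1) d 1).flatMap (ringPt d)).length = (2*d - 1).toNat * 2 := by
      rw [List.length_flatMap]
      rw [List.map_congr_left (g := fun _ => 2) (fun y hy => by
        rw [PySem.List.mem_pyRange_one] at hy
        unfold ringPt
        rw [if_pos (by simp only [Int.abs_eq_natAbs y] at *; omega)]
        rfl)]
      rw [List.map_const', List.sum_replicate, PySem.List.length_pyRange_one]
      simp only [smul_eq_mul]
      congr 1
      omega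
    rw [hmid]
    have h1 : (ringPt d (-d)).length = 1 := by
      unfold ringPt
      rw [if_neg (by rw [abs_neg, abs_of_nonneg h0]; omega)]
      rfl
    have h2 : (ringPt d d).length = 1 := by
      unfold ringPt
      rw [if_neg (by rw [abs_of_nonneg h0]; omega)]
      rfl
    simp only [List.flatMap_cons, List.flatMap_nil, List.append_nil, h1, h2]
    rw [if_pos (by omega)]
    omega

def fill (l : List (Int × Int)) (n : Nat) : List (Option (Int × Int)) :=
  l.map some ++ List.replicate (n - l.length) none

lemma fill_set (l : List (Int × Int)) (c : Int × Int) (n : Nat) (h : l.length < n) :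
    (fill l n).set l.length (some c) = fill (l ++ [c]) n := by
  unfold fill
  have hrep : List.replicate (n - l.length) (none : Option (Int × Int))
      = none :: List.replicate (n - (l.length + 1)) none := by
    rw [← List.replicate_succ]
    congr 1
    omega
  rw [hrep]
  have hidx : l.length = (l.map some).length + 0 := by simp
  rw [hidx, List.set_append_right _ _ (by simp)]
  simp

lemma ptsF_append_out (K d : Int) (l : List (Int × Int)) (c : Int × Int)
    (h : ¬(get_distance c.1 c.2 = d ∧ get_distance c.1 c.2 < K)) :
    ptsF K d (l ++ [c]) = ptsF K d l := by
  unfold ptsF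
  rw [List.filter_append]
  simp only [List.filter_cons, List.filter_nil]
  rw [if_neg (by simpa using h)]
  simp

lemma ptsF_append_in (K d : Int) (l : List (Int × Int)) (c : Int × Int)
    (h : get_distance c.1 c.2 = d ∧ get_distance c.1 c.2 < K) :
    ptsF K d (l ++ [c]) = ptsF K d l ++ [c] := by
  unfold ptsF
  rw [List.filter_append]
  congr 1
  simp only [List.filter_cons, List.filter_nil]
  rw [if_pos (by simpa using h)]

def stateOf (K : Int) (done : List (Int × Int)) :
    List (List (Option (Int × Int))) × List Int :=
  ((PySem.List.pyRange 0 K 1).map (fun d => fill (ptsF K d done) (bucketSize d)),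
   (PySem.List.pyRange 0 (K + 1) 1).map (fun d => ((ptsF K d done).length : Int)))

lemma dist_nonneg' (y x : Int) : 0 ≤ get_distance y x := by
  unfold get_distance
  have := abs_nonneg y
  have := abs_nonneg x
  omega

lemma stateOf_step (K : Int) (done : List (Int × Int)) (c : Int × Int)
    (hlen : get_distance c.1 c.2 < K →
      (ptsF K (get_distance c.1 c.2) (done ++ [c])).length ≤ bucketSize (get_distance c.1 c.2)) :
    gslStep K (stateOf K done) c.1 c.2 = stateOf K (done ++ [c]) := by
  have hdc0 : 0 ≤ get_distance c.1 c.2 := dist_nonneg' c.1 c.2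
  set dc := get_distance c.1 c.2 with hdc
  by_cases hK : dc ≥ K
  · have heq : ∀ d : Int, ptsF K d (done ++ [c]) = ptsF K d done :=
      fun d => ptsF_append_out K d done c (by omega)
    simp only [gslStep, stateOf, ← hdc, if_pos hK, heq]
  · have hK' : dc < K := by omega
    have hmem : ptsF K dc (done ++ [c]) = ptsF K dc done ++ [c] :=
      ptsF_append_in K dc done c ⟨rfl, hK'⟩
    have hfit : (ptsF K dc done).length < bucketSize dc := by
      have := hlen hK'
      rw [hmem] at this
      simp at this
      omega
    have hidx : (stateOf K done).2.getD dc.toNat 0 = ((ptsF K dc done).length : Int) := by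
      unfold stateOf
      rw [List.getD_eq_getElem _ _ (by
        rw [List.length_map, PySem.List.length_pyRange_one]
        omega)]
      rw [List.getElem_map, PySem.List.getElem_pyRange_one]
      have hcast : (0:Int) + (dc.toNat : Int) = dc := by omega
      rw [hcast]
    have hrow : (stateOf K done).1.getD dc.toNat [] = fill (ptsF K dc done) (bucketSize dc) := by
      unfold stateOf
      rw [List.getD_eq_getElem _ _ (by
        rw [List.length_map, PySem.List.length_pyRange_one]
        omega)]
      rw [List.getElem_map, PySem.List.getElem_pyRange_one]
      have hcast : (0:Int) + (dc.toNat : Int) = dc := by omega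
      rw [hcast]
    simp only [gslStep, ← hdc, if_neg hK, hidx, hrow]
    refine Prod.ext_iff.mpr ⟨?_, ?_⟩
    · show ((PySem.List.pyRange 0 K 1).map (fun d => fill (ptsF K d done) (bucketSize d))).set dc.toNat _
        = (PySem.List.pyRange 0 K 1).map (fun d => fill (ptsF K d (done ++ [c])) (bucketSize d))
      apply List.ext_getElem
      · simp
      · intro j h1 h2
        rw [List.getElem_set]
        rw [List.getElem_map, List.getElem_map, PySem.List.getElem_pyRange_one]
        by_cases hj : dc.toNat = j
        · rw [if_pos hj]
          have hdj : (0 : Int) + (j : Int) = dc := by omega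
          rw [hdj]
          rw [Int.toNat_natCast]  -- idx.toNat where idx = (length : Int)
          rw [fill_set _ _ _ hfit, hmem]
        · rw [if_neg hj]
          have hdj : ptsF K (0 + (j:Int)) (done ++ [c]) = ptsF K (0 + (j:Int)) done :=
            ptsF_append_out K _ done c (by omega)
          rw [hdj]
    · show ((PySem.List.pyRange 0 (K+1) 1).map (fun d => ((ptsF K d done).length : Int))).set dc.toNat _
        = (PySem.List.pyRange 0 (K+1) 1).map (fun d => ((ptsF K d (done ++ [c])).length : Int))
      apply List.ext_getElem
      · simp
      · intro j h1 h2
        rw [List.getElem_set]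
        rw [List.getElem_map, List.getElem_map, PySem.List.getElem_pyRange_one]
        by_cases hj : dc.toNat = j
        · rw [if_pos hj]
          have hdj : (0 : Int) + (j : Int) = dc := by omega
          rw [hdj, hmem]
          simp
        · rw [if_neg hj]
          have hdj : ptsF K (0 + (j:Int)) (done ++ [c]) = ptsF K (0 + (j:Int)) done :=
            ptsF_append_out K _ done c (by omega)
          rw [hdj]

lemma loop_inv (K : Int) (rest done : List (Int × Int)) (h : done ++ rest = grid K) :
    rest.foldl (fun st c => gslStep K st c.1 c.2) (stateOf K done) = stateOf K (done ++ rest) := by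
  induction rest generalizing done with
  | nil => simp
  | cons c rest' ih =>
    rw [List.foldl_cons]
    have hpre : (done ++ [c]) <+: grid K := ⟨rest', by simpa using h⟩
    have hlen : get_distance c.1 c.2 < K →
        (ptsF K (get_distance c.1 c.2) (done ++ [c])).length ≤ bucketSize (get_distance c.1 c.2) := by
      intro hK
      have h0 : 0 ≤ get_distance c.1 c.2 := dist_nonneg' c.1 c.2
      have hsub := (List.IsPrefix.filter
        (fun p : Int × Int => decide (get_distance p.1 p.2 = get_distance c.1 c.2) &&
          decide (get_distance p.1 p.2 < K)) hpre).length_le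
      have hgrid : ptsF K (get_distance c.1 c.2) (grid K) = ringB (get_distance c.1 c.2) :=
        ringB_spec K _ h0 hK
      unfold ptsF at hgrid ⊢
      calc (List.filter _ (done ++ [c])).length ≤ _ := hsub
        _ = (ringB (get_distance c.1 c.2)).length := by rw [hgrid]
        _ = bucketSize (get_distance c.1 c.2) := ringB_length _ h0
    rw [stateOf_step K done c hlen, ih (done ++ [c]) (by simpa using h)]
    simp

lemma init_state (K : Int) :
    (((PySem.List.pyRange 1 (K + 1) 1).map (fun i =>
        List.replicate (if i > 1 then ((i - 1) * 4).toNat else 1) (none : Option (Int × Int)))),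
     List.replicate (K + 1).toNat (0 : Int)) = stateOf K [] := by
  unfold stateOf
  refine Prod.ext_iff.mpr ⟨?_, ?_⟩
  · apply List.ext_getElem
    · simp only [List.length_map, PySem.List.length_pyRange_one]
      omega
    · intro j h1 h2
      rw [List.getElem_map, List.getElem_map, PySem.List.getElem_pyRange_one,
          PySem.List.getElem_pyRange_one]
      have hpts : ptsF K (0 + (j:Int)) [] = [] := rfl
      rw [hpts]
      unfold fill
      simp only [List.map_nil, List.length_nil, Nat.sub_zero, List.nil_append]
      congr 1
      unfold bucketSize
      rcases Nat.eq_zero_or_pos j with hj | hj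
      · subst hj; norm_num
      · rw [if_pos (by omega), if_pos (by omega)]
        omega
  · rw [List.map_congr_left (g := fun _ => (0 : Int)) (fun d _ => by
      show ((ptsF K d []).length : Int) = 0
      rfl)]
    rw [List.map_const', PySem.List.length_pyRange_one]
    norm_num

lemma alt_inner (d : Int) :
    (PySem.List.pyRange (-d) (d + 1) 1).foldl (fun ring y =>
      let r := d - |y|
      if r > 0 then ring ++ [(y, -r)] ++ [(y, r)] else ring ++ [(y, 0)]) [] = ringB d := by
  have hstep : (fun (ring : List (Int × Int)) (y : Int) =>
      let r := d - |y|
      if r > 0 then ring ++ [(y, -r)] ++ [(y, r)] else ring ++ [(y, 0)])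
      = fun ring y => ring ++ ringPt d y := by
    funext ring y
    simp only [ringPt]
    split_ifs <;> simp
  rw [hstep, ringB, List.flatMap_eq_foldl]

lemma main_eq (K : Int) : get_searching_loc K = get_searching_loc_alt K := by
  unfold get_searching_loc get_searching_loc_alt
  simp only []
  -- A's nested loop is a fold over the row-major grid
  have hnest : (PySem.List.pyRange (-K) (K + 1) 1).foldl (fun st y =>
      (PySem.List.pyRange (-K) (K + 1) 1).foldl (fun st x => gslStep K st y x) st)
      (stateOf K []) = (grid K).foldl (fun st c => gslStep K st c.1 c.2) (stateOf K []) := by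
    rw [grid, List.foldl_flatMap]
    congr 1
    funext st y
    rw [List.foldl_map]
  rw [init_state K, hnest, loop_inv K (grid K) [] (by simp), List.nil_append]
  -- unwrap the filled buckets
  rw [show (stateOf K (grid K)).1
      = (PySem.List.pyRange 0 K 1).map (fun d => fill (ptsF K d (grid K)) (bucketSize d)) from rfl]
  rw [List.map_map]
  rw [PySem.List.foldl_append_singleton_eq_map
    (f := fun d => (PySem.List.pyRange (-d) (d + 1) 1).foldl (fun ring y =>
      let r := d - |y|
      if r > 0 then ring ++ [(y, -r)] ++ [(y, r)] else ring ++ [(y, 0)]) [])]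
  rw [List.nil_append]
  refine List.map_congr_left (fun d hd => ?_)
  rw [PySem.List.mem_pyRange_one] at hd
  simp only [Function.comp_apply]
  rw [alt_inner d, ringB_spec K d hd.1 hd.2]
  rw [fill, ← ringB_length d hd.1]
  simp

-- ===== VERDICT (by name: the statement is the Claim_ definition above) =====
theorem get_searching_loc_spec : Claim_equal_get_searching_loc := by
  intro K _
  unfold Spec_get_searching_loc
  exact main_eq K
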